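-- pv_equiv track=rewrite | github.com/geb2701/ALGORITMOS-Y-ESTRUCTURAS-DE-DATOS-I | Unidad 3 Matrices/Ejercicio 2/GustavoBruno.py | MatrizA
-- ===== SOURCE A (Python) =====
-- def MatrizA(n):
--     nuevaMatriz = []
--
--     for i in range (n):
--         nuevaMatriz.append([])
--         for j in range (n):
--             if (i == j):
--                 valor = (i*2) + 1
--             else:
--                 valor = 0
--             nuevaMatriz[i].append(valor)
--
--     return nuevaMatriz
-- ===== SOURCE B (Python) =====
-- def MatrizA(n):
--     # Flat construction: entry at flat index k (row-major) is on the diagonal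
--     # exactly when k is a multiple of m+1; build the flat list once, then cut rows.
--     m = max(n, 0)
--     flat = [(k // m * 2 + 1) if k % (m + 1) == 0 else 0 for k in range(m * m)]
--     return [flat[r * m:(r + 1) * m] for r in range(m)]
-- ===== Notes on version B (the rewrite author's own statement) =====
-- stated objective: alternative
-- what changed: Builds the matrix entries as one flat row-major list, detecting the diagonal arithmetically (a flat index is diagonal exactly when it is a multiple of n plus one, with value twice its row quotient plus one) and then cutting the flat list into rows by slicing, instead of A's nested row/column loops with a per-cell i==j branch.
import Mathlib
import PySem

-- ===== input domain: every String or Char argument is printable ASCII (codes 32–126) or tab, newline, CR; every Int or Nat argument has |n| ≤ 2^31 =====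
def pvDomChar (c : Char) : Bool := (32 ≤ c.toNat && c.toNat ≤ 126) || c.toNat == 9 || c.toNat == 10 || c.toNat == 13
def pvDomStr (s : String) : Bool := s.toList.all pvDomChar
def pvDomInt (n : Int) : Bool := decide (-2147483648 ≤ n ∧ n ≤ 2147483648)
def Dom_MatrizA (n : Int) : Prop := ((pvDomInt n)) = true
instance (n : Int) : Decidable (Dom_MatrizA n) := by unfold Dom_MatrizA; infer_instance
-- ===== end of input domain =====

-- B builds the matrix as one flat row-major list (diagonal detected by k % (n+1) == 0) cut into rows by slicing.

-- ===== PORT A =====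
-- Literal transliteration: outer loop appends a fresh row, inner loop appends
-- (i*2)+1 on the diagonal and 0 elsewhere into that (last) row.
def MatrizA (n : Int) : List (List Int) :=
  (PySem.List.pyRange 0 n 1).foldl
    (fun nuevaMatriz i =>
      nuevaMatriz ++
        [(PySem.List.pyRange 0 n 1).foldl
          (fun row j => row ++ [if i == j then i * 2 + 1 else 0]) ([] : List Int)])
    []

-- ===== PORT B =====
-- Literal transliteration of Source B: m = max(n,0); flat row-major list whose entry at
-- index k is 2*(k//m)+1 when k % (m+1) == 0 and 0 otherwise; rows = slices of flat.
def MatrizA_alt (n : Int) : List (List Int) :=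
  let m := max n 0
  let flat := (PySem.List.pyRange 0 (m * m) 1).map
    (fun k => if PySem.Int.mod k (m + 1) == 0 then PySem.Int.floordiv k m * 2 + 1 else 0)
  (PySem.List.pyRange 0 m 1).map
    (fun r => PySem.List.slice flat (some (r * m)) (some ((r + 1) * m)))

-- ===== PRECONDITION & SPEC =====
def Spec_MatrizA (n : Int) (out : List (List Int)) : Prop := out = MatrizA_alt n
instance (n : Int) (out : List (List Int)) : Decidable (Spec_MatrizA n out) := by unfold Spec_MatrizA; infer_instance

-- ===== CLAIM (what is proved, stated in full; the proofs are below) =====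
def Claim_equal_MatrizA : Prop := ∀ (n : Int), Dom_MatrizA n → Spec_MatrizA n (MatrizA n)

-- ===== LEMMAS AND PROOFS =====

theorem pv_pyRange_cast (n : Int) :
    PySem.List.pyRange 0 n 1 = (List.range n.toNat).map (fun (k : Nat) => (k : Int)) := by
  rw [PySem.List.pyRange_one]
  simp only [Int.sub_zero]
  exact List.map_congr_left (fun k _ => by simp)

theorem pv_foldl_snoc {α β : Type} (f : α → β) (l : List α) (acc : List β) :
    l.foldl (fun a x => a ++ [f x]) acc = acc ++ l.map f := by
  induction l generalizing acc with
  | nil => simp only [List.foldl_nil, List.map_nil, List.append_nil]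
  | cons x xs ih =>
    simp only [List.foldl_cons, List.map_cons, ih, List.append_assoc, List.singleton_append]

theorem MatrizA_eq_map (n : Int) :
    MatrizA n = (List.range n.toNat).map
      (fun (i : Nat) => (List.range n.toNat).map
        (fun (j : Nat) => if ((i : Int)) == ((j : Int)) then (i : Int) * 2 + 1 else 0)) := by
  unfold MatrizA
  rw [pv_pyRange_cast, pv_foldl_snoc, List.nil_append, List.map_map]
  refine List.map_congr_left (fun i _ => ?_)
  rw [Function.comp_apply, pv_foldl_snoc, List.nil_append, List.map_map]
  rfl

theorem pv_diag_mod (N r j : Nat) (hr : r < N) (hj : j < N) :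
    (((r * N + j : Nat) : Int) % ((N : Int) + 1) = 0) ↔ r = j := by
  have h1 : ((r * N + j : Nat) : Int) = ((j : Int) - r) + ((N : Int) + 1) * r := by
    push_cast; ring
  rw [h1, Int.add_mul_emod_self_left]
  rcases Nat.lt_or_ge j r with h | h
  · have h2 : ((j : Int) - r) % ((N : Int) + 1)
        = (((j : Int) - r) + ((N : Int) + 1) * 1) % ((N : Int) + 1) := by
      rw [Int.add_mul_emod_self_left]
    rw [h2, Int.emod_eq_of_lt (by omega) (by omega)]
    omega
  · rw [Int.emod_eq_of_lt (by omega) (by omega)]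
    omega

theorem pv_diag_div (N r j : Nat) (hj : j < N) :
    PySem.Int.floordiv ((r * N + j : Nat) : Int) (N : Int) = r := by
  rw [PySem.Int.floordiv_eq_iff_of_pos (by omega)]
  constructor
  · push_cast
    nlinarith
  · push_cast
    nlinarith

theorem pv_entry (N r j : Nat) (hr : r < N) (hj : j < N) :
    (if PySem.Int.mod ((r * N + j : Nat) : Int) ((N : Int) + 1) == 0 then
        PySem.Int.floordiv ((r * N + j : Nat) : Int) (N : Int) * 2 + 1 else 0)
      = (if ((r : Int)) == ((j : Int)) then (r : Int) * 2 + 1 else 0) := by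
  rw [PySem.Int.mod_eq_emod_of_pos (by omega)]
  by_cases h : r = j
  · subst h
    rw [if_pos (by simpa using (pv_diag_mod N r r hr hr).mpr rfl), if_pos (by simp),
      pv_diag_div N r r hr]
  · have hne : ¬ (((r * N + j : Nat) : Int) % ((N : Int) + 1) == 0) = true := by
      simp only [beq_iff_eq]
      exact fun hc => h ((pv_diag_mod N r j hr hj).mp hc)
    rw [if_neg hne, if_neg (by simp only [beq_iff_eq, Int.natCast_inj]; exact h)]

theorem MatrizA_alt_eq_map (n : Int) :
    MatrizA_alt n = (List.range n.toNat).map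
      (fun (i : Nat) => (List.range n.toNat).map
        (fun (j : Nat) => if ((i : Int)) == ((j : Int)) then (i : Int) * 2 + 1 else 0)) := by
  have hm : max n 0 = ((n.toNat : Int)) := by omega
  set N := n.toNat with hN
  simp only [MatrizA_alt, hm]
  have hNN : ((N : Int)) * ((N : Int)) = (((N * N : Nat)) : Int) := by push_cast; ring
  rw [hNN, pv_pyRange_cast, pv_pyRange_cast, List.map_map, List.map_map]
  refine List.map_congr_left (fun r hr => ?_)
  have hrN : r < N := List.mem_range.mp hr
  have hb1 : ((r : Int)) * (N : Int) = (((r * N : Nat)) : Int) := by push_cast; ring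
  have hb2 : ((r : Int) + 1) * (N : Int) = (((r * N + N : Nat)) : Int) := by push_cast; ring
  rw [Function.comp_apply, hb1, hb2, PySem.List.slice_natCast]
  have htk : r * N + N - r * N = N := by omega
  rw [htk]
  have hlen : ((List.range (N * N)).map
      ((fun k => if PySem.Int.mod k ((N : Int) + 1) == 0 then
          PySem.Int.floordiv k (N : Int) * 2 + 1 else 0) ∘
        (fun (k : Nat) => (k : Int)))).length = N * N := by
    simp
  have hge : r * N + N ≤ N * N := by nlinarith
  apply List.ext_getElem
  · simp only [List.length_take, List.length_drop, List.length_map, List.length_range]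
    omega
  · intro j hj hj'
    have hjN : j < N := by simpa using hj'
    have hidx : r * N + j < N * N := by nlinarith
    rw [List.getElem_take, List.getElem_drop, List.getElem_map, List.getElem_range,
      List.getElem_map, List.getElem_range, Function.comp_apply]
    exact pv_entry N r j hrN hjN

-- ===== VERDICT (by name: the statement is the Claim_ definition above) =====
theorem MatrizA_spec : Claim_equal_MatrizA := by
  intro n _
  unfold Spec_MatrizA
  rw [MatrizA_eq_map, MatrizA_alt_eq_map]
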